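-- pv_equiv track=rewrite | github.com/dynamicslab/langevin-regression | .ipynb_checkpoints/dwutils-checkpoint.py | dwell_times
-- ===== SOURCE A (Python) =====
-- def dwell_times(states, dt=1):
--     # Given a vector of states (i.e. from switched_states() ), return dwell time in each state
--     N = len(states)
--     switch_times = []  # List of dwell times
--     idx = 0
--     last_switch = idx
--     cur_state = states[idx]
--
--     while idx < N:
--         if states[idx] != cur_state:
--             switch_times.append( dt*(idx-last_switch) )
--             last_switch = idx
--             cur_state = states[idx]
--
--         idx += 1
--
--     return switch_times
-- ===== SOURCE B (Python) =====
-- def dwell_times(states, dt=1):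
--     # Boundary-list decomposition: collect switch indices, then diff adjacent boundaries.
--     N = len(states)
--     boundaries = [0] + [i for i in range(1, N) if states[i] != states[i - 1]]
--     return [dt * (boundaries[k] - boundaries[k - 1]) for k in range(1, len(boundaries))]
-- ===== Notes on version B (the rewrite author's own statement) =====
-- stated objective: simpler
-- what changed: Replaces the stateful while-loop scan (tracking idx/last_switch/cur_state and emitting inline) with a two-phase decomposition: build the list of switch boundary indices by one comprehension, then diff adjacent boundaries.
import Mathlib
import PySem

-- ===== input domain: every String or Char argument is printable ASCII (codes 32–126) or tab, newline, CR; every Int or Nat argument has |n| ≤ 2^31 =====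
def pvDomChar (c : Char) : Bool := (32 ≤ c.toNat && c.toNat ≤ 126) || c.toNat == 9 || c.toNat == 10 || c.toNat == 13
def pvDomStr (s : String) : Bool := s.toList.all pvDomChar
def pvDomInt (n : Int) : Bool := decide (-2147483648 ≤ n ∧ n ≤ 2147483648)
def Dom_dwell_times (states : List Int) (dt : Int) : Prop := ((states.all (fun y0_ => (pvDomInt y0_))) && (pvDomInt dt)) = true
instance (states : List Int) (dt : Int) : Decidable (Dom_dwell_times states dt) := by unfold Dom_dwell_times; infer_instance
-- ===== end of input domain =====

-- B replaces A's stateful single scan with a boundary-index list plus an adjacent-difference pass (simpler decomposition; return value only).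

-- ===== PORT A =====
-- A's while-loop over idx = 0..N-1 as a foldl over range(0, N) carrying (switch_times, last_switch, cur_state).
-- states[idx] inside the loop is ported as pyGetD states idx 0: every idx the loop reads satisfies 0 ≤ idx < len(states), so it is exact.
def dwell_times (states : List Int) (dt : Int) : List Int :=
  match PySem.List.pyGet? states 0 with
  | none => []   -- Python raises IndexError reading the first element here; excluded by Pre_dwell_times
  | some c0 =>
    ((PySem.List.pyRange 0 (states.length : Int) 1).foldl
      (fun (acc : List Int × Int × Int) idx =>
        if PySem.List.pyGetD states idx 0 ≠ acc.2.2 then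
          (acc.1 ++ [dt * (idx - acc.2.1)], idx, PySem.List.pyGetD states idx 0)
        else acc)
      ([], 0, c0)).1

-- ===== PORT B =====
-- the second comprehension of Source B, over the bound local 'boundaries' (kept as a helper, like the Python local);
-- in-range indexing boundaries[k], boundaries[k-1] ported as pyGetD with default 0 (exact: 1 ≤ k < len(boundaries))
def pvDwellFromBoundaries (dt : Int) (boundaries : List Int) : List Int :=
  (PySem.List.pyRange 1 (boundaries.length : Int) 1).map
    (fun k => dt * (PySem.List.pyGetD boundaries k 0 - PySem.List.pyGetD boundaries (k - 1) 0))

-- Source B: boundaries = [0] + [i for i in range(1, N) if states[i] != states[i-1]], then the diff comprehension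
def dwell_times_alt (states : List Int) (dt : Int) : List Int :=
  pvDwellFromBoundaries dt
    (0 :: (PySem.List.pyRange 1 (states.length : Int) 1).filter
      (fun i => PySem.List.pyGetD states i 0 ≠ PySem.List.pyGetD states (i - 1) 0))

-- ===== PRECONDITION & SPEC =====
-- Pre_ excludes only the empty list, where A raises IndexError reading the first element.
def Pre_dwell_times (states : List Int) (dt : Int) : Prop := states ≠ []
instance (states : List Int) (dt : Int) : Decidable (Pre_dwell_times states dt) := by unfold Pre_dwell_times; infer_instance
def pvWitness_dwell_times : List Int × Int := ([1, 1, 2, 2, 2, 1], 3)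

def Spec_dwell_times (states : List Int) (dt : Int) (out : List Int) : Prop := out = dwell_times_alt states dt
instance (states : List Int) (dt : Int) (out : List Int) : Decidable (Spec_dwell_times states dt out) := by unfold Spec_dwell_times; infer_instance

-- ===== CLAIM (what is proved, stated in full; the proofs are below) =====
def Claim_equal_dwell_times : Prop := ∀ (states : List Int) (dt : Int), Dom_dwell_times states dt → Pre_dwell_times states dt → Spec_dwell_times states dt (dwell_times states dt)

-- ===== LEMMAS AND PROOFS =====

-- adjacent differences of a boundary list, scaled by dt (proof-only helper)
def pvDiffs (dt : Int) : List Int → List Int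
  | [] => []
  | [_] => []
  | x :: y :: rest => dt * (y - x) :: pvDiffs dt (y :: rest)

theorem pvDiffs_append (dt : Int) (l : List Int) (hl : l ≠ []) (x : Int) :
    pvDiffs dt (l ++ [x]) = pvDiffs dt l ++ [dt * (x - l.getLastD 0)] := by
  induction l with
  | nil => simp at hl
  | cons a t ih =>
    cases t with
    | nil => simp [pvDiffs]
    | cons b t' =>
      have := ih (by simp)
      simp only [List.cons_append, pvDiffs] at this ⊢
      simp [this]

-- the index-difference comprehension of Source B equals pvDiffs
theorem pvMap_eq_diffs (dt : Int) (bl : List Int) :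
    pvDwellFromBoundaries dt bl = pvDiffs dt bl := by
  unfold pvDwellFromBoundaries
  induction bl using List.reverseRecOn with
  | nil => simp [PySem.List.pyRange_one_eq_nil, pvDiffs]
  | append_singleton l x ih =>
    cases l with
    | nil =>
      simp [PySem.List.pyRange_one_eq_nil, pvDiffs]
    | cons a t =>
      have hlen : ((a :: t) ++ [x]).length = (a :: t).length + 1 := by simp
      have hn1 : (1 : Int) ≤ ((a :: t).length : Int) := by
        have : (a :: t).length = t.length + 1 := rfl
        rw [this]; push_cast; omega
      rw [hlen]
      push_cast
      rw [PySem.List.pyRange_one_succ_right (by omega : (1:Int) ≤ ((a :: t).length : Int)),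
          List.map_append, List.map_cons, List.map_nil]
      rw [pvDiffs_append dt (a :: t) (by simp) x]
      congr 1
      · rw [← ih]
        apply List.map_congr_left
        intro k hk
        have hk' := (PySem.List.mem_pyRange_one).mp hk
        have h1 : PySem.List.pyGetD ((a :: t) ++ [x]) k 0 = PySem.List.pyGetD (a :: t) k 0 := by
          rw [PySem.List.pyGetD_of_nonneg _ _ (by omega), PySem.List.pyGetD_of_nonneg _ _ (by omega)]
          rw [List.getD_append]
          omega
        have h2 : PySem.List.pyGetD ((a :: t) ++ [x]) (k - 1) 0 = PySem.List.pyGetD (a :: t) (k - 1) 0 := by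
          rw [PySem.List.pyGetD_of_nonneg _ _ (by omega), PySem.List.pyGetD_of_nonneg _ _ (by omega)]
          rw [List.getD_append]
          omega
        rw [h1, h2]
      · -- the new last difference
        have hx : PySem.List.pyGetD ((a :: t) ++ [x]) ((a :: t).length : Int) 0 = x := by
          rw [PySem.List.pyGetD_natCast]
          simp
        have hlast : PySem.List.pyGetD ((a :: t) ++ [x]) (((a :: t).length : Int) - 1) 0 = (a :: t).getLastD 0 := by
          have hpos : 0 < (a :: t).length := by simp
          have hcast : (((a :: t).length : Int) - 1) = (((a :: t).length - 1 : Nat) : Int) := by omega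
          rw [hcast, PySem.List.pyGetD_natCast]
          rw [List.getD_append _ _ _ _ (by omega)]
          rw [List.getD_eq_getElem _ _ (by omega)]
          rw [List.getLastD_eq_getLast?, List.getLast?_eq_getElem?]
          simp
          rfl
        rw [hx, hlast]

-- A's loop invariant: after m ≥ 1 steps the state is
-- (pvDiffs of boundaries seen so far, last boundary, states[m-1]).
theorem pvLoopA_inv (states : List Int) (dt : Int) (m : Nat) (hm : 1 ≤ m) :
    (PySem.List.pyRange 0 (m : Int) 1).foldl
      (fun (acc : List Int × Int × Int) idx =>
        if PySem.List.pyGetD states idx 0 ≠ acc.2.2 then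
          (acc.1 ++ [dt * (idx - acc.2.1)], idx, PySem.List.pyGetD states idx 0)
        else acc)
      ([], 0, PySem.List.pyGetD states 0 0)
    = (pvDiffs dt (0 :: (PySem.List.pyRange 1 (m : Int) 1).filter
          (fun i => PySem.List.pyGetD states i 0 ≠ PySem.List.pyGetD states (i - 1) 0)),
       (0 :: (PySem.List.pyRange 1 (m : Int) 1).filter
          (fun i => PySem.List.pyGetD states i 0 ≠ PySem.List.pyGetD states (i - 1) 0)).getLastD 0,
       PySem.List.pyGetD states ((m : Int) - 1) 0) := by
  induction m with
  | zero => omega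
  | succ n ih =>
    by_cases hn : 1 ≤ n
    · have h0n : (0 : Int) ≤ (n : Int) := by positivity
      have h1n : (1 : Int) ≤ (n : Int) := by exact_mod_cast hn
      push_cast
      rw [PySem.List.pyRange_one_succ_right h0n, List.foldl_append,
          PySem.List.pyRange_one_succ_right h1n, List.filter_append, ih hn]
      rw [show ((n : Int) + 1 - 1) = (n : Int) by ring]
      simp only [List.foldl_cons, List.foldl_nil, List.filter_cons, List.filter_nil]
      by_cases hc : PySem.List.pyGetD states (n : Int) 0 = PySem.List.pyGetD states ((n : Int) - 1) 0
      · simp [hc]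
      · simp only [ne_eq, hc, not_false_eq_true, decide_true, if_true]
        rw [← List.cons_append,
            pvDiffs_append dt (0 :: (PySem.List.pyRange 1 (n : Int) 1).filter
              (fun i => PySem.List.pyGetD states i 0 ≠ PySem.List.pyGetD states (i - 1) 0))
              (by simp) (n : Int)]
        have hlastc : ∀ (l : List Int) (x y : Int), ((y :: (l ++ [x])).getLast?.getD 0) = x := by
          intro l x y
          rw [show y :: (l ++ [x]) = (y :: l) ++ [x] from by simp, List.getLast?_concat]
          rfl
        simp [hlastc]
    · -- n = 0, so m = 1: the single iteration at idx = 0 never switches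
      have hn0 : n = 0 := by omega
      subst hn0
      simp [show PySem.List.pyRange 0 1 1 = [0] from by decide,
            show PySem.List.pyRange 1 1 1 = [] from by decide, pvDiffs]

theorem dwell_times_eq (states : List Int) (dt : Int) (h : states ≠ []) :
    dwell_times states dt = dwell_times_alt states dt := by
  obtain ⟨a, t, rfl⟩ : ∃ a t, states = a :: t := by
    cases states with
    | nil => simp at h
    | cons a t => exact ⟨a, t, rfl⟩
  have hget : PySem.List.pyGet? (a :: t) 0 = some a := by
    simp [PySem.List.pyGet?, PySem.List.pyIdx?]
  have hgd : PySem.List.pyGetD (a :: t) 0 0 = a := by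
    simp [PySem.List.pyGetD]
  have key := pvLoopA_inv (a :: t) dt (a :: t).length (by simp)
  rw [hgd] at key
  unfold dwell_times dwell_times_alt
  rw [pvMap_eq_diffs, hget]
  exact congrArg Prod.fst key

-- ===== VERDICT (by name: the statement is the Claim_ definition above) =====
theorem dwell_times_spec : Claim_equal_dwell_times := by
  intro states dt _ hpre
  unfold Spec_dwell_times
  exact dwell_times_eq states dt hpre
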